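-- pv_equiv track=rewrite | github.com/keerthirajsivashankar/My_Python_Solutions | Medium/498.py | findDiagonalOrder
-- ===== SOURCE A (Python) =====
-- from typing import List
--
-- def findDiagonalOrder(mat: List[List[int]]) -> List[int]:
--     """
--     Traverses a 2D matrix in a diagonal order and returns the elements
--     as a 1D list.
--
--     This approach uses a dictionary or a list of lists to group elements
--     by the sum of their row and column indices (r + c), which is constant
--     for each diagonal.
--
--     Args:
--       mat: A 2D list of integers.
--
--     Returns:
--       A 1D list containing the elements in diagonal order.
--     """
--     # Get the dimensions of the matrix.
--     rows, cols = len(mat), len(mat[0])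
--
--     # Create a list of lists to hold the elements of each diagonal.
--     # The number of diagonals is `rows + cols - 1`.
--     diagonals = [[] for _ in range(rows + cols - 1)]
--
--     # Iterate through the matrix and group elements into their respective diagonals.
--     for r in range(rows):
--         for c in range(cols):
--             # The sum of row and column indices (r + c) determines the diagonal group.
--             diagonals[r + c].append(mat[r][c])
--
--     ans = []
--     # This flag helps us alternate between normal and reversed order for each diagonal.
--     need_reversed = 1
--
--     # Iterate through the diagonals and append them to the final result list.
--     for diagonal in diagonals:
--         if need_reversed:
--             # For odd-indexed diagonals (0, 2, 4...), reverse the list.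
--             # In the problem, these correspond to upward-moving diagonals.
--             ans.extend(diagonal[::-1])
--         else:
--             # For even-indexed diagonals (1, 3, 5...), add them in the original order.
--             # These correspond to downward-moving diagonals.
--             ans.extend(diagonal[:])
--
--         # Toggle the flag for the next diagonal.
--         need_reversed = 1 - need_reversed
--
--     return ans
-- ===== SOURCE B (Python) =====
-- from typing import List
--
-- def findDiagonalOrder(mat: List[List[int]]) -> List[int]:
--     """Diagonal zigzag order computed directly: for each diagonal d = r + c,
--     the valid row indices form the interval [max(0, d-cols+1), min(d, rows-1)];
--     walk that interval downward (even d) or upward (odd d). No buckets."""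
--     rows, cols = len(mat), len(mat[0])
--     out = []
--     for d in range(rows + cols - 1):
--         lo, hi = max(0, d - cols + 1), min(d, rows - 1)
--         if d % 2:
--             rs = range(lo, hi + 1)
--         else:
--             rs = range(hi, lo - 1, -1)
--         for r in rs:
--             out.append(mat[r][d - r])
--     return out
-- ===== Notes on version B (the rewrite author's own statement) =====
-- stated objective: alternative
-- what changed: A makes a full grouping pass that buckets every element by r+c and then concatenates the buckets with a reversal toggle; B has no buckets at all: it computes each diagonal's row interval [max(0,d-cols+1), min(d,rows-1)] arithmetically and walks it downward or upward according to the diagonal's parity, emitting elements directly.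
import Mathlib
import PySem

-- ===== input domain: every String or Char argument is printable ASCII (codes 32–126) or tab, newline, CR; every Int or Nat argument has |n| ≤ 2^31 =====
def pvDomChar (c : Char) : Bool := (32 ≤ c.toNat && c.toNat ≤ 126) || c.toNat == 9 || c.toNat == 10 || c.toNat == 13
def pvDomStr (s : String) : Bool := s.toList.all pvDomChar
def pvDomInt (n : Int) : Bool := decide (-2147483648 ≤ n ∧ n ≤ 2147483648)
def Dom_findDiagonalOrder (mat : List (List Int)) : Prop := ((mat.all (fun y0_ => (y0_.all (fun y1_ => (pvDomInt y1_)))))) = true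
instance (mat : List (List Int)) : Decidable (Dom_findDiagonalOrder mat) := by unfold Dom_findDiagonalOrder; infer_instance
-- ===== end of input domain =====

-- B replaces A's bucket-by-(r+c) grouping pass with direct per-diagonal index
-- arithmetic (interval of rows, walked in the zigzag direction); objective: alternative.

-- ===== PORT A =====
-- literal transliteration of Source A: group elements into buckets by r+c, then
-- concatenate buckets, reversing every other one (need_reversed flag).
def findDiagonalOrder (mat : List (List Int)) : List Int :=
  let rows : Int := mat.length
  let cols : Int := ((PySem.List.pyGet? mat 0).getD []).length   -- len(mat[0]); mat ≠ [] by Pre_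
  -- diagonals = [[] for _ in range(rows + cols - 1)]
  let diagonals0 : List (List Int) :=
    (PySem.List.pyRange 0 (rows + cols - 1) 1).map (fun _ => ([] : List Int))
  -- for r in range(rows): for c in range(cols): diagonals[r+c].append(mat[r][c])
  -- (indices r, c, r+c are in range under Pre_, so getD defaults / modify no-ops never fire)
  let diagonals :=
    (PySem.List.pyRange 0 rows 1).foldl (fun ds r =>
      (PySem.List.pyRange 0 cols 1).foldl (fun ds c =>
        ds.modify (r + c).toNat
          (fun dg => dg ++ [PySem.List.pyGetD (PySem.List.pyGetD mat r []) c 0])) ds) diagonals0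
  -- ans/need_reversed loop; diagonal[::-1] is reverse, diagonal[:] is the list itself
  (diagonals.foldl (fun (p : List Int × Int) diagonal =>
      (p.1 ++ (if p.2 ≠ 0 then diagonal.reverse else diagonal), 1 - p.2))
      (([] : List Int), (1 : Int))).1

-- ===== PORT B =====
-- literal transliteration of Source B: for each diagonal d, row indices lie in
-- [max(0,d-cols+1), min(d,rows-1)]; walk up for odd d, down for even d.
def findDiagonalOrder_alt (mat : List (List Int)) : List Int :=
  let rows : Int := mat.length
  let cols : Int := ((PySem.List.pyGet? mat 0).getD []).length
  (PySem.List.pyRange 0 (rows + cols - 1) 1).foldl (fun out d =>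
    let lo : Int := max 0 (d - cols + 1)
    let hi : Int := min d (rows - 1)
    let rs : List Int :=
      if PySem.Int.mod d 2 ≠ 0 then PySem.List.pyRange lo (hi + 1) 1
      else PySem.List.pyRange hi (lo - 1) (-1)
    rs.foldl (fun out r =>
      out ++ [PySem.List.pyGetD (PySem.List.pyGetD mat r []) (d - r) 0]) out) []

-- ===== PRECONDITION & SPEC =====
-- Pre_ excludes exactly the inputs where the Python A raises: the empty matrix
-- (len(mat[0]) → IndexError) and matrices with a row shorter than the first row
-- (mat[r][c] → IndexError). On every other input A returns.
def Pre_findDiagonalOrder (mat : List (List Int)) : Prop :=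
  mat ≠ [] ∧ ∀ row ∈ mat, mat.headI.length ≤ row.length
instance (mat : List (List Int)) : Decidable (Pre_findDiagonalOrder mat) := by
  unfold Pre_findDiagonalOrder; infer_instance

def pvWitness_findDiagonalOrder : List (List Int) := [[1, 2, 3], [4, 5, 6], [7, 8, 9]]

def Spec_findDiagonalOrder (mat : List (List Int)) (out : List Int) : Prop := out = findDiagonalOrder_alt mat
instance (mat : List (List Int)) (out : List Int) : Decidable (Spec_findDiagonalOrder mat out) := by unfold Spec_findDiagonalOrder; infer_instance

-- ===== CLAIM (what is proved, stated in full; the proofs are below) =====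
def Claim_equal_findDiagonalOrder : Prop := ∀ (mat : List (List Int)), Dom_findDiagonalOrder mat → Pre_findDiagonalOrder mat → Spec_findDiagonalOrder mat (findDiagonalOrder mat)

-- ===== LEMMAS AND PROOFS =====

-- value fetched for row r, column c (shared shape of both ports' element access)
def pvE (mat : List (List Int)) (r c : Int) : Int :=
  PySem.List.pyGetD (PySem.List.pyGetD mat r []) c 0

-- the bucket-filling step of port A
def pvStep (mat : List (List Int)) (ds : List (List Int)) (p : Int × Int) : List (List Int) :=
  ds.modify (p.1 + p.2).toNat (fun dg => dg ++ [pvE mat p.1 p.2])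

lemma pvStep_foldl_getElem? (mat : List (List Int)) (ps : List (Int × Int)) (ds : List (List Int)) (d : Nat) :
    (ps.foldl (pvStep mat) ds)[d]? =
      (ds[d]?).map (· ++ (ps.filter (fun p => (p.1 + p.2).toNat = d)).map (fun p => pvE mat p.1 p.2)) := by
  induction ps generalizing ds with
  | nil => cases h : ds[d]? <;> simp [h]
  | cons p t ih =>
    simp only [List.foldl_cons, ih, pvStep, List.getElem?_modify, List.filter_cons]
    by_cases hpd : (p.1 + p.2).toNat = d
    · simp only [hpd]
      cases ds[d]? <;> simp
    · simp only [hpd]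
      cases ds[d]? <;> simp

-- the zigzag concatenation of port A's second loop, written structurally
def pvZig : List (List Int) → Int → List Int
  | [], _ => []
  | d :: t, flag => (if flag ≠ 0 then d.reverse else d) ++ pvZig t (1 - flag)

lemma pvZig_foldl (ds : List (List Int)) (acc : List Int) (flag : Int) :
    (ds.foldl (fun (p : List Int × Int) diagonal =>
      (p.1 ++ (if p.2 ≠ 0 then diagonal.reverse else diagonal), 1 - p.2)) (acc, flag)).1
    = acc ++ pvZig ds flag := by
  induction ds generalizing acc flag with
  | nil => simp [pvZig]
  | cons dgl t ih =>
    rw [List.foldl_cons, ih]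
    simp [pvZig, List.append_assoc]

lemma pvZig_pyRange_map (b : Int) (f : Int → List Int) :
    ∀ (k : Nat) (a flag : Int), (b - a).toNat = k → flag = (if a % 2 = 0 then 1 else 0) →
    pvZig ((PySem.List.pyRange a b 1).map f) flag
      = (PySem.List.pyRange a b 1).flatMap (fun d => if d % 2 = 0 then (f d).reverse else f d) := by
  intro k
  induction k with
  | zero =>
    intro a flag hk _
    rw [PySem.List.pyRange_one_eq_nil (by omega)]
    simp [pvZig]
  | succ k ih =>
    intro a flag hk hflag
    rw [PySem.List.pyRange_one_cons (by omega)]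
    simp only [List.map_cons, List.flatMap_cons, pvZig]
    have h1 : (1 : Int) - flag = (if (a + 1) % 2 = 0 then 1 else 0) := by
      have := Int.emod_two_eq a
      have := Int.emod_two_eq (a + 1)
      omega
    rw [h1, ih (a + 1) _ (by omega) rfl, hflag]
    by_cases h : a % 2 = 0 <;> simp [h]

-- the row interval of diagonal d
def pvLo (cols d : Int) : Int := max 0 (d - cols + 1)
def pvHi (rows d : Int) : Int := min d (rows - 1)

-- filtering an increasing range for a single value
lemma pvFilter_eq (x : Int) : ∀ (k : Nat) (a b : Int), (b - a).toNat = k →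
    (PySem.List.pyRange a b 1).filter (fun c => c = x)
      = if a ≤ x ∧ x < b then [x] else [] := by
  intro k
  induction k with
  | zero =>
    intro a b hk
    rw [PySem.List.pyRange_one_eq_nil (by omega)]
    have h1 : ¬(a ≤ x ∧ x < b) := by omega
    rw [if_neg h1]
    rfl
  | succ k ih =>
    intro a b hk
    rw [PySem.List.pyRange_one_cons (by omega), List.filter_cons, ih (a + 1) b (by omega)]
    by_cases hax : a = x
    · have h1 : ¬(a + 1 ≤ x ∧ x < b) := by omega
      have h2 : a ≤ x ∧ x < b := by omega
      rw [if_neg h1, if_pos h2]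
      simp [hax]
    · have h1 : ((a + 1 ≤ x ∧ x < b) ↔ (a ≤ x ∧ x < b)) := by omega
      simp only [decide_eq_true_eq, if_neg hax, h1]

-- A's bucket for diagonal d equals the interval map, in increasing row order
lemma pvBucket_eq (mat : List (List Int)) (rows cols d : Int)
    (hr : rows = mat.length) (hc : 0 ≤ cols) (hd : 0 ≤ d) (hdlt : d < rows + cols - 1) :
    (((PySem.List.pyRange 0 rows 1).flatMap
        (fun r => (PySem.List.pyRange 0 cols 1).map (fun c => (r, c)))).filter
        (fun p => (p.1 + p.2).toNat = d.toNat)).map (fun p => pvE mat p.1 p.2)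
    = (PySem.List.pyRange (pvLo cols d) (pvHi rows d + 1) 1).map (fun r => pvE mat r (d - r)) := by
  have hrows : (0 : Int) ≤ rows := by simp [hr]
  rw [List.filter_flatMap, List.map_flatMap]
  have hstep : ∀ r ∈ PySem.List.pyRange 0 rows 1,
      (((PySem.List.pyRange 0 cols 1).map (fun c => (r, c))).filter
          (fun p => (p.1 + p.2).toNat = d.toNat)).map (fun p => pvE mat p.1 p.2)
      = if r ≤ d ∧ d - r < cols then [pvE mat r (d - r)] else [] := by
    intro r hrmem
    have hr0 : 0 ≤ r ∧ r < rows := PySem.List.mem_pyRange_one.mp hrmem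
    rw [List.filter_map]
    have hcong : (PySem.List.pyRange 0 cols 1).filter
          ((fun p : Int × Int => decide ((p.1 + p.2).toNat = d.toNat)) ∘ (fun c => (r, c)))
        = (PySem.List.pyRange 0 cols 1).filter (fun c => c = d - r) := by
      apply List.filter_congr
      intro c hcmem
      have hc0 : 0 ≤ c ∧ c < cols := PySem.List.mem_pyRange_one.mp hcmem
      simp only [Function.comp]
      exact decide_eq_decide.mpr (by omega)
    rw [hcong, pvFilter_eq (d - r) (cols - 0).toNat 0 cols rfl]
    by_cases h : r ≤ d ∧ d - r < cols
    · have h' : (0 : Int) ≤ d - r ∧ d - r < cols := by omega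
      rw [if_pos h', if_pos h, List.map_map]
      rfl
    · have h' : ¬((0 : Int) ≤ d - r ∧ d - r < cols) := by omega
      rw [if_neg h', if_neg h]
      rfl
  rw [List.flatMap_congr hstep]
  have hsplit : PySem.List.pyRange 0 rows 1
      = PySem.List.pyRange 0 (pvLo cols d) 1
        ++ PySem.List.pyRange (pvLo cols d) (pvHi rows d + 1) 1
        ++ PySem.List.pyRange (pvHi rows d + 1) rows 1 := by
    rw [PySem.List.pyRange_one_append 0 (pvLo cols d) rows
          (by simp only [pvLo]; omega) (by simp only [pvLo]; omega),
        PySem.List.pyRange_one_append (pvLo cols d) (pvHi rows d + 1) rows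
          (by simp only [pvLo, pvHi]; omega) (by simp only [pvHi]; omega),
        List.append_assoc]
  rw [hsplit, List.flatMap_append, List.flatMap_append]
  have hpre : (PySem.List.pyRange 0 (pvLo cols d) 1).flatMap
      (fun r => if r ≤ d ∧ d - r < cols then [pvE mat r (d - r)] else []) = [] := by
    rw [List.flatMap_eq_nil_iff]
    intro r hrmem
    have hm := PySem.List.mem_pyRange_one.mp hrmem
    have h1 : ¬(r ≤ d ∧ d - r < cols) := by simp only [pvLo] at hm; omega
    rw [if_neg h1]
  have hpost : (PySem.List.pyRange (pvHi rows d + 1) rows 1).flatMap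
      (fun r => if r ≤ d ∧ d - r < cols then [pvE mat r (d - r)] else []) = [] := by
    rw [List.flatMap_eq_nil_iff]
    intro r hrmem
    have hm := PySem.List.mem_pyRange_one.mp hrmem
    have h1 : ¬(r ≤ d ∧ d - r < cols) := by simp only [pvHi] at hm; omega
    rw [if_neg h1]
  have hmid : (PySem.List.pyRange (pvLo cols d) (pvHi rows d + 1) 1).flatMap
      (fun r => if r ≤ d ∧ d - r < cols then [pvE mat r (d - r)] else [])
      = (PySem.List.pyRange (pvLo cols d) (pvHi rows d + 1) 1).map (fun r => pvE mat r (d - r)) := by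
    rw [List.flatMap_congr (g := fun r => [pvE mat r (d - r)]) ?_, ← List.map_eq_flatMap]
    intro r hrmem
    have hm := PySem.List.mem_pyRange_one.mp hrmem
    have h1 : r ≤ d ∧ d - r < cols := by simp only [pvLo, pvHi] at hm; omega
    rw [if_pos h1]
  rw [hpre, hpost, hmid, List.nil_append, List.append_nil]

-- nested loop of port A as a fold of pvStep over the flattened (r, c) pair list
lemma pvNested_eq (mat : List (List Int)) (rr cc : Int) (ds0 : List (List Int)) :
    (PySem.List.pyRange 0 rr 1).foldl (fun ds r =>
      (PySem.List.pyRange 0 cc 1).foldl (fun ds c =>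
        ds.modify (r + c).toNat
          (fun dg => dg ++ [PySem.List.pyGetD (PySem.List.pyGetD mat r []) c 0])) ds) ds0
    = ((PySem.List.pyRange 0 rr 1).flatMap
        (fun r => (PySem.List.pyRange 0 cc 1).map (fun c => (r, c)))).foldl (pvStep mat) ds0 := by
  rw [List.foldl_flatMap]
  have hfun : (fun (ds : List (List Int)) (r : Int) =>
      (PySem.List.pyRange 0 cc 1).foldl (fun ds c =>
        ds.modify (r + c).toNat
          (fun dg => dg ++ [PySem.List.pyGetD (PySem.List.pyGetD mat r []) c 0])) ds)
      = (fun (acc : List (List Int)) (x : Int) =>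
          ((PySem.List.pyRange 0 cc 1).map (fun c => (x, c))).foldl (pvStep mat) acc) := by
    funext ds r
    rw [List.foldl_map]
    rfl
  rw [hfun]

-- characterization of port A as a flatMap over diagonals
lemma pvA_eq (mat : List (List Int)) :
    findDiagonalOrder mat
    = (PySem.List.pyRange 0 ((mat.length : Int) + ((PySem.List.pyGet? mat 0).getD []).length - 1) 1).flatMap
        (fun d => if d % 2 = 0
          then ((PySem.List.pyRange (pvLo ((PySem.List.pyGet? mat 0).getD []).length d)
                  (pvHi (mat.length : Int) d + 1) 1).map (fun r => pvE mat r (d - r))).reverse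
          else (PySem.List.pyRange (pvLo ((PySem.List.pyGet? mat 0).getD []).length d)
                  (pvHi (mat.length : Int) d + 1) 1).map (fun r => pvE mat r (d - r))) := by
  simp only [findDiagonalOrder]
  rw [pvNested_eq]
  set rows : Int := (mat.length : Int) with hrows
  set cols : Int := (((PySem.List.pyGet? mat 0).getD []).length : Int) with hcols
  have hdiag : ((PySem.List.pyRange 0 rows 1).flatMap
        (fun r => (PySem.List.pyRange 0 cols 1).map (fun c => (r, c)))).foldl (pvStep mat)
          ((PySem.List.pyRange 0 (rows + cols - 1) 1).map (fun _ => ([] : List Int)))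
      = (PySem.List.pyRange 0 (rows + cols - 1) 1).map
          (fun d => (PySem.List.pyRange (pvLo cols d) (pvHi rows d + 1) 1).map
            (fun r => pvE mat r (d - r))) := by
    apply List.ext_getElem?
    intro i
    rw [pvStep_foldl_getElem?]
    simp only [List.getElem?_map, PySem.List.getElem?_pyRange_one]
    by_cases hi : i < (rows + cols - 1 - 0).toNat
    · rw [if_pos hi]
      simp only [Option.map_some, List.nil_append, Option.some.injEq]
      have hd : (((0 : Int) + (i : Int)).toNat) = i := by omega
      have hpred : (fun p : Int × Int => decide ((p.1 + p.2).toNat = i))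
          = (fun p : Int × Int => decide ((p.1 + p.2).toNat = ((0 : Int) + (i : Int)).toNat)) := by
        funext p
        rw [hd]
      rw [hpred]
      exact pvBucket_eq mat rows cols ((0 : Int) + (i : Int)) hrows (by omega) (by omega) (by omega)
    · rw [if_neg hi]
      rfl
  rw [hdiag, pvZig_foldl, List.nil_append]
  exact pvZig_pyRange_map (rows + cols - 1) _ (rows + cols - 1 - 0).toNat 0 1 rfl (by norm_num)

lemma pvB_eq (mat : List (List Int)) :
    findDiagonalOrder_alt mat
    = (PySem.List.pyRange 0 ((mat.length : Int) + ((PySem.List.pyGet? mat 0).getD []).length - 1) 1).flatMap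
        (fun d => if d % 2 = 0
          then ((PySem.List.pyRange (pvLo ((PySem.List.pyGet? mat 0).getD []).length d)
                  (pvHi (mat.length : Int) d + 1) 1).map (fun r => pvE mat r (d - r))).reverse
          else (PySem.List.pyRange (pvLo ((PySem.List.pyGet? mat 0).getD []).length d)
                  (pvHi (mat.length : Int) d + 1) 1).map (fun r => pvE mat r (d - r))) := by
  unfold findDiagonalOrder_alt
  simp only [PySem.List.foldl_append_singleton_eq_map]
  rw [PySem.List.foldl_append_eq_flatMap, List.nil_append]
  apply List.flatMap_congr
  intro d _
  rw [PySem.Int.mod_eq_emod_of_pos (by norm_num)]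
  by_cases h : d % 2 = 0
  · simp only [h, ne_eq, not_true_eq_false, ite_false]
    rw [PySem.List.pyRange_neg_one_eq_reverse, ← List.map_reverse]
    simp [pvLo, pvHi, pvE]
  · rw [if_pos (by simp [h]), if_neg h]
    rfl
-- ===== VERDICT (by name: the statement is the Claim_ definition above) =====
theorem findDiagonalOrder_spec : Claim_equal_findDiagonalOrder := by
  intro mat _ _
  unfold Spec_findDiagonalOrder
  rw [pvA_eq, pvB_eq]
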